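-- pv_equiv track=rewrite | github.com/OZestina/TheGreatestGrace | codingTest/programmers/py/230213_불량사용자.py | solution
-- ===== SOURCE A (Python) =====
-- def cover_id(ban, user):
--     for i in range(len(ban)):
--         if ban[i] != '*' and ban[i] != user[i]:
--             return 0
--     return 1
--
-- def psb_pair(psb_id, ids, idx, maxi, stack):
--     if idx == maxi:
--         a = sorted(ids)
--         if a not in stack:
--             stack.append(a)
--         return
--
--     for i in psb_id[idx]:
--         if i not in ids:
--             ids[idx] = i
--             psb_pair(psb_id, ids, idx + 1, maxi, stack)
--             ids[idx] = -1
--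
-- def solution(user_id, banned_id):
--     l = len(banned_id)
--     psb_id = []
--     for b in range(l):
--         l_b = len(banned_id[b])
--         temp = []
--         for u in range(len(user_id)):
--             l_u = len(user_id[u])
--             if l_b == l_u:
--                 if cover_id(banned_id[b], user_id[u]):
--                     temp.append(u)
--         if len(temp) == 0:
--             return 0
--         psb_id.append(temp)
--
--     temp = [-1 for _ in range(l)]
--     stack = []
--     psb_pair(psb_id, temp, 0, l, stack)
--     answer = len(stack)
--
--     return answer
-- ===== SOURCE B (Python) =====
-- def solution(user_id, banned_id):
--     candidates = []
--     for ban in banned_id: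
--         cand = [u for u, name in enumerate(user_id)
--                 if len(name) == len(ban)
--                 and all(b == '*' or b == c for b, c in zip(ban, name))]
--         candidates.append(cand)
--     combos = [[]]
--     for cand in candidates:
--         combos = [combo + [u] for combo in combos for u in cand]
--     seen = set()
--     for combo in combos:
--         if len(set(combo)) == len(banned_id):
--             seen.add(tuple(sorted(combo)))
--     return len(seen)
-- ===== Notes on version B (the rewrite author's own statement) =====
-- stated objective: alternative
-- what changed: Replaces A's in-place backtracking recursion (psb_pair with a mutable ids array, -1 sentinels and a sorted-list-membership stack) by an iterative generate-then-filter pass: build the full cartesian product of the candidate lists with a fold, keep combinations whose elements are all distinct, and dedup via a set of sorted tuples.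
import Mathlib
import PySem

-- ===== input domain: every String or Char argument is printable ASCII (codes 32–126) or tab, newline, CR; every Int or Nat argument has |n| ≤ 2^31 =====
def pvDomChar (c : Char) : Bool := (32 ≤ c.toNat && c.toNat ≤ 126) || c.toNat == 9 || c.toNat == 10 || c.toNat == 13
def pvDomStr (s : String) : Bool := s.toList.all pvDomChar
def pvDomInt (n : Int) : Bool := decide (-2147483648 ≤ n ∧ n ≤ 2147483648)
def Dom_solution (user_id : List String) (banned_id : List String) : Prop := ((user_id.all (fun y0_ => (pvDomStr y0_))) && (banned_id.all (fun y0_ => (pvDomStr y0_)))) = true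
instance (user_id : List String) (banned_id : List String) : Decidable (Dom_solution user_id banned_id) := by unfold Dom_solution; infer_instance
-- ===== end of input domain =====

-- B replaces A's in-place backtracking recursion by an iterative product/filter/dedup pass (objective: alternative).

-- ===== PORT A =====
-- cover_id: loop over indices with early return; user[i] totalized with getD — in-range
-- at every call from solution (equal lengths are checked before the call).
def coverIdAux (bs us : List Char) (i : Nat) : Int :=
  if h : i < bs.length then
    if bs[i] ≠ '*' ∧ bs[i] ≠ us.getD i ' ' then 0
    else coverIdAux bs us (i + 1)
  else 1
termination_by bs.length - i

def coverId (ban user : String) : Int := coverIdAux ban.toList user.toList 0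

-- inner loop 'for u in range(len(user_id))' building temp
def solutionTemp (user_id : List String) (b : String) : List Int :=
  (PySem.List.pyRange 0 (user_id.length : Int) 1).foldl
    (fun acc u =>
      if PySem.Str.len b == PySem.Str.len (PySem.List.pyGetD user_id u "") &&
         !(coverId b (PySem.List.pyGetD user_id u "") == 0)
      then acc ++ [u] else acc) []

-- outer loop building psb_id; none models the early 'return 0'
def buildPsb (user_id : List String) : List String → Option (List (List Int))
  | [] => some []
  | b :: bs =>
      let temp := solutionTemp user_id b
      if temp = [] then none
      else (buildPsb user_id bs).map (fun rest => temp :: rest)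

-- psb_pair: ids[idx] = i then recurse then reset — pure version passes ids.set idx i.
-- psb_id[idx] totalized with getD (in range: idx < maxi = len psb at every call);
-- the final 'else stack' is a totalization guard, unreachable since idx ≤ maxi always.
def psbPair (psb : List (List Int)) (ids : List Int) (idx maxi : Nat)
    (stack : List (List Int)) : List (List Int) :=
  if idx = maxi then
    let a := PySem.List.sorted ids (fun x => x) false
    if a ∈ stack then stack else stack ++ [a]
  else if h : idx < maxi then
    (psb.getD idx []).foldl
      (fun st i => if i ∈ ids then st else psbPair psb (ids.set idx i) (idx + 1) maxi st)
      stack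
  else stack
termination_by maxi - idx

def solution (user_id : List String) (banned_id : List String) : Int :=
  match buildPsb user_id banned_id with
  | none => 0
  | some psb =>
      let temp := (PySem.List.pyRange 0 (banned_id.length : Int) 1).map (fun _ => (-1 : Int))
      let stack := psbPair psb temp 0 banned_id.length []
      (stack.length : Int)

-- ===== PORT B =====
def solution_alt (user_id : List String) (banned_id : List String) : Int :=
  let candidates := banned_id.map (fun ban =>
    ((PySem.List.enumerate user_id 0).filter (fun p =>
        PySem.Str.len p.2 == PySem.Str.len ban &&
        (ban.toList.zip p.2.toList).all (fun q => q.1 == '*' || q.1 == q.2))).map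
      (fun p => p.1))
  let combos := candidates.foldl
    (fun cs cand => cs.flatMap (fun combo => cand.map (fun u => combo ++ [u]))) [[]]
  let seen := combos.foldl
    (fun s combo =>
      if PySem.Set.len (PySem.Set.ofList combo) == (banned_id.length : Int)
      then PySem.Set.add s (PySem.List.sorted combo (fun x => x) false) else s)
    PySem.Set.empty
  PySem.Set.len seen

-- ===== PRECONDITION & SPEC =====
def Spec_solution (user_id : List String) (banned_id : List String) (out : Int) : Prop := out = solution_alt user_id banned_id
instance (user_id : List String) (banned_id : List String) (out : Int) : Decidable (Spec_solution user_id banned_id out) := by unfold Spec_solution; infer_instance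

-- ===== CLAIM (what is proved, stated in full; the proofs are below) =====
def Claim_equal_solution : Prop := ∀ (user_id : List String) (banned_id : List String), Dom_solution user_id banned_id → Spec_solution user_id banned_id (solution user_id banned_id)

-- ===== LEMMAS AND PROOFS =====

-- A's 'if a not in stack: stack.append(a)' step
def addA (st : List (List Int)) (a : List Int) : List (List Int) :=
  if a ∈ st then st else st ++ [a]

-- the step A's backtracker performs per full combination, relative to the chosen prefix
def stepA (chosen : List Int) (st : List (List Int)) (tail : List Int) : List (List Int) :=
  if (chosen ++ tail).Nodup then addA st (PySem.List.sorted (chosen ++ tail) (fun x => x) false)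
  else st

-- cartesian product of the candidate lists, first factor outermost
def recProd : List (List Int) → List (List Int)
  | [] => [[]]
  | c :: cs => c.flatMap (fun u => (recProd cs).map (fun t => u :: t))

lemma coverIdAux_eq (bs us : List Char) (h : us.length = bs.length) :
    ∀ i, coverIdAux bs us i =
      if ((bs.drop i).zip (us.drop i)).all (fun q => q.1 == '*' || q.1 == q.2) then 1 else 0 := by
  intro i
  fun_induction coverIdAux bs us i with
  | case1 i hi hbad =>
      have hiu : i < us.length := by omega
      have hdb := List.drop_eq_getElem_cons hi
      have hdu := List.drop_eq_getElem_cons hiu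
      have hgd : us.getD i ' ' = us[i] := List.getD_eq_getElem us ' ' hiu
      rw [hgd] at hbad
      have hhd : ((bs[i], us[i]).1 == '*' || (bs[i], us[i]).1 == (bs[i], us[i]).2) = false := by
        simp [hbad.1, hbad.2]
      have hall : ((bs.drop i).zip (us.drop i)).all (fun q => q.1 == '*' || q.1 == q.2)
          = false := by
        rw [hdb, hdu, List.zip_cons_cons, List.all_cons, hhd, Bool.false_and]
      rw [hall]
      simp
  | case2 i hi hok ih =>
      have hiu : i < us.length := by omega
      have hdb := List.drop_eq_getElem_cons hi
      have hdu := List.drop_eq_getElem_cons hiu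
      have hgd : us.getD i ' ' = us[i] := List.getD_eq_getElem us ' ' hiu
      rw [hgd] at hok
      have hhd : (bs[i] == '*' || bs[i] == us[i]) = true := by
        by_cases hstar : bs[i] = '*'
        · simp [hstar]
        · have := not_and.1 hok hstar
          simp at this
          simp [this]
      rw [ih, hdb, hdu, List.zip_cons_cons, List.all_cons]
      have hhd' : ((bs[i], us[i]).1 == '*' || (bs[i], us[i]).1 == (bs[i], us[i]).2) = true := hhd
      rw [hhd', Bool.true_and]
  | case3 i hi =>
      have : bs.drop i = [] := List.drop_eq_nil_of_le (by omega)
      simp [this]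

lemma coverId_eq (ban name : String) (h : name.toList.length = ban.toList.length) :
    coverId ban name =
      if (ban.toList.zip name.toList).all (fun q => q.1 == '*' || q.1 == q.2) then 1 else 0 := by
  simpa using coverIdAux_eq ban.toList name.toList h 0

lemma pred_eq (ban name : String) :
    (PySem.Str.len ban == PySem.Str.len name && !(coverId ban name == 0))
      = (PySem.Str.len name == PySem.Str.len ban &&
         (ban.toList.zip name.toList).all (fun q => q.1 == '*' || q.1 == q.2)) := by
  by_cases h : name.toList.length = ban.toList.length
  · rw [coverId_eq ban name h]
    have h1 : PySem.Str.len ban = PySem.Str.len name := by simp [PySem.Str.len_eq, h]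
    rw [h1]
    split_ifs with hc <;> simp [hc]
  · have h3 : ban.toList.length ≠ name.toList.length := fun hx => h hx.symm
    have h4 : ¬ ban.length = name.length := by simpa using h3
    have hb1 : (((ban.toList.length : Int)) == ((name.toList.length : Int))) = false := by
      simp
      exact h4
    have hb2 : (((name.toList.length : Int)) == ((ban.toList.length : Int))) = false := by
      simp
      exact fun hx => h4 hx.symm
    simp only [PySem.Str.len_eq, hb1, hb2, Bool.false_and]

lemma solutionTemp_eq (user : List String) (b : String) :
    solutionTemp user b = (PySem.List.pyRange 0 (user.length : Int) 1).filter
      (fun u => PySem.Str.len b == PySem.Str.len (PySem.List.pyGetD user u "") &&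
                !(coverId b (PySem.List.pyGetD user u "") == 0)) := by
  simpa [solutionTemp] using
    PySem.List.foldl_append_if_eq_filter
      (l := PySem.List.pyRange 0 (user.length : Int) 1)
      (p := fun u => PySem.Str.len b == PySem.Str.len (PySem.List.pyGetD user u "") &&
                !(coverId b (PySem.List.pyGetD user u "") == 0)) (acc := [])

lemma candB_eq (user : List String) (ban : String) :
    ((PySem.List.enumerate user 0).filter (fun p =>
        PySem.Str.len p.2 == PySem.Str.len ban &&
        (ban.toList.zip p.2.toList).all (fun q => q.1 == '*' || q.1 == q.2))).map (fun p => p.1)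
      = solutionTemp user ban := by
  rw [solutionTemp_eq]
  have he : PySem.List.enumerate user 0
      = (PySem.List.pyRange 0 (user.length : Int) 1).map
          (fun j => (j, PySem.List.pyGetD user j "")) := by
    simpa using PySem.List.enumerate_eq_map_pyRange (d := "") (xs := user)
  rw [he, List.filter_map, List.map_map]
  have : ∀ u ∈ PySem.List.pyRange 0 (user.length : Int) 1,
      ((fun p => PySem.Str.len p.2 == PySem.Str.len ban &&
          (ban.toList.zip p.2.toList).all (fun q => q.1 == '*' || q.1 == q.2)) ∘
        (fun j => (j, PySem.List.pyGetD user j ""))) u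
        = (fun u => PySem.Str.len ban == PySem.Str.len (PySem.List.pyGetD user u "") &&
            !(coverId ban (PySem.List.pyGetD user u "") == 0)) u := by
    intro u _
    simp only [Function.comp]
    exact (pred_eq ban (PySem.List.pyGetD user u "")).symm
  rw [List.filter_congr this]
  rw [show ((fun (p : Int × String) => p.1) ∘ fun j => (j, PySem.List.pyGetD user j ""))
      = fun (j : Int) => j from rfl, List.map_id']

lemma solutionTemp_nonneg (user : List String) (b : String) :
    ∀ i ∈ solutionTemp user b, 0 ≤ i := by
  rw [solutionTemp_eq]
  intro i hi
  have := (List.mem_filter.1 hi).1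
  exact (PySem.List.mem_pyRange_one.1 this).1

lemma buildPsb_some (user : List String) :
    ∀ bs psb, buildPsb user bs = some psb → psb = bs.map (solutionTemp user) := by
  intro bs
  induction bs with
  | nil => intro psb h; simp [buildPsb] at h; simp [h.symm]
  | cons b bs ih =>
      intro psb h
      simp only [buildPsb] at h
      split_ifs at h with he
      obtain ⟨rest, h1, rfl⟩ := Option.map_eq_some_iff.1 h
      simp [ih rest h1]

lemma buildPsb_none (user : List String) :
    ∀ bs, buildPsb user bs = none → ∃ b ∈ bs, solutionTemp user b = [] := by
  intro bs
  induction bs with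
  | nil => intro h; simp [buildPsb] at h
  | cons b bs ih =>
      intro h
      simp only [buildPsb] at h
      split_ifs at h with he
      · exact ⟨b, by simp, he⟩
      · obtain ⟨b', hb', ht⟩ := ih (Option.map_eq_none_iff.1 h)
        exact ⟨b', by simp [hb'], ht⟩

lemma set_add_eq {α : Type} [BEq α] [LawfulBEq α] (s : List α) (x : α) :
    PySem.Set.add s x = if x ∈ s then s else s ++ [x] := by
  simp [PySem.Set.add, PySem.Set.contains]

lemma nodup_append_single {α : Type} {l : List α} {x : α} (h : l.Nodup) (hx : x ∉ l) :
    (l ++ [x]).Nodup := by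
  rw [List.nodup_append]
  refine ⟨h, List.nodup_singleton x, ?_⟩
  intro a ha b hb hab
  simp at hb
  subst hb
  subst hab
  exact hx ha

lemma foldl_add_le {α : Type} [BEq α] [LawfulBEq α] :
    ∀ (c s : List α), (c.foldl PySem.Set.add s).length ≤ s.length + c.length := by
  intro c
  induction c with
  | nil => simp
  | cons x c ih =>
      intro s
      have h1 : (PySem.Set.add s x).length ≤ s.length + 1 := by
        rw [set_add_eq]; split_ifs <;> simp
      calc ((x :: c).foldl PySem.Set.add s).length
          = (c.foldl PySem.Set.add (PySem.Set.add s x)).length := by simp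
        _ ≤ (PySem.Set.add s x).length + c.length := ih _
        _ ≤ s.length + (x :: c).length := by simp; omega

lemma foldl_add_len_iff {α : Type} [BEq α] [LawfulBEq α] :
    ∀ (c s : List α), s.Nodup →
      ((c.foldl PySem.Set.add s).length = s.length + c.length ↔ (s ++ c).Nodup) := by
  intro c
  induction c with
  | nil => intro s hs; simpa using hs
  | cons x c ih =>
      intro s hs
      rw [List.foldl_cons, set_add_eq]
      by_cases hx : x ∈ s
      · rw [if_pos hx]
        constructor
        · intro hlen
          have := foldl_add_le c s
          simp at hlen
          omega
        · intro hnd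
          exact ((List.nodup_append.1 hnd).2.2 x hx x (by simp) rfl).elim
      · rw [if_neg hx]
        have hs' : (s ++ [x]).Nodup := nodup_append_single hs hx
        have := ih (s ++ [x]) hs'
        simp only [List.length_append, List.length_singleton] at this
        rw [show s.length + (x :: c).length = s.length + 1 + c.length by simp; omega]
        rw [this, List.append_assoc, List.singleton_append]

lemma ofList_len_iff {α : Type} [BEq α] [LawfulBEq α] (c : List α) :
    ((PySem.Set.ofList c).length = c.length) ↔ c.Nodup := by
  rw [PySem.Set.ofList_eq_foldl]
  simpa using foldl_add_len_iff c [] List.nodup_nil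

lemma combos_foldl :
    ∀ (cs init : List (List Int)),
      cs.foldl (fun cs' cand => cs'.flatMap (fun combo => cand.map (fun u => combo ++ [u]))) init
        = init.flatMap (fun p => (recProd cs).map (fun t => p ++ t)) := by
  intro cs
  induction cs with
  | nil => intro init; simp [recProd]
  | cons c cs ih =>
      intro init
      rw [List.foldl_cons, ih]
      simp only [recProd, List.flatMap_map, List.map_flatMap, List.flatMap_assoc, List.map_map]
      congr 1
      funext p
      congr 1
      funext u
      congr 1
      funext t
      simp

lemma length_mem_recProd : ∀ (cs : List (List Int)) t, t ∈ recProd cs → t.length = cs.length := by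
  intro cs
  induction cs with
  | nil => intro t ht; simp [recProd] at ht; simp [ht]
  | cons c cs ih =>
      intro t ht
      simp only [recProd, List.mem_flatMap, List.mem_map] at ht
      obtain ⟨u, _, t', ht', rfl⟩ := ht
      simp [ih t' ht']

lemma recProd_nil_mem : ∀ (cs : List (List Int)), [] ∈ cs → recProd cs = [] := by
  intro cs
  induction cs with
  | nil => intro h; simp at h
  | cons c cs ih =>
      intro h
      rcases List.mem_cons.1 h with h | h
      · simp [recProd, ← h]
      · simp [recProd, ih h]

lemma foldl_const {α β : Type} (l : List α) (init : β) :
    l.foldl (fun st _ => st) init = init := by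
  induction l generalizing init <;> simp [*]

lemma psbPair_eq :
    ∀ (rest pre : List (List Int)) (chosen : List Int) (stack : List (List Int)),
      chosen.length = pre.length → chosen.Nodup → (∀ l ∈ rest, ∀ i ∈ l, 0 ≤ i) →
      psbPair (pre ++ rest) (chosen ++ List.replicate rest.length (-1)) pre.length
          (pre.length + rest.length) stack
        = (recProd rest).foldl (stepA chosen) stack := by
  intro rest
  induction rest with
  | nil =>
      intro pre chosen stack hlen hnd _
      simp [psbPair, recProd, stepA, addA, hnd]
  | cons c rs ih =>
      intro pre chosen stack hlen hnd hnn
      have hne : pre.length ≠ pre.length + (c :: rs).length := by simp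
      have hlt : pre.length < pre.length + (c :: rs).length := by simp
      rw [psbPair, if_neg hne, dif_pos hlt]
      have hget : (pre ++ c :: rs).getD pre.length [] = c := by
        simp [List.getD]
      rw [hget]
      have hrep : List.replicate (c :: rs).length (-1 : Int)
          = (-1 : Int) :: List.replicate rs.length (-1) := by simp [List.replicate_succ]
      rw [hrep]
      -- RHS
      have hrhs : (recProd (c :: rs)).foldl (stepA chosen) stack
          = c.foldl (fun st i => (recProd rs).foldl (fun st t => stepA chosen st (i :: t)) st)
              stack := by
        simp only [recProd]
        rw [List.foldl_flatMap]
        congr 1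
        funext st i
        rw [List.foldl_map]
      rw [hrhs]
      apply PySem.List.foldl_congr_mem
      intro st i hic
      have hipos : (0 : Int) ≤ i := hnn c (by simp) i hic
      have hmem : (i ∈ chosen ++ (-1 : Int) :: List.replicate rs.length (-1)) ↔ i ∈ chosen := by
        simp [List.mem_append, List.mem_replicate]
        omega
      by_cases hi : i ∈ chosen
      · rw [if_pos (hmem.2 hi)]
        have : ∀ st (t : List Int), stepA chosen st (i :: t) = st := by
          intro st t
          unfold stepA
          rw [if_neg]
          intro hnd'
          exact ((List.nodup_append.1 hnd').2.2 i hi i (by simp) rfl)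
        calc st = (recProd rs).foldl (fun st _ => st) st := (foldl_const _ _).symm
          _ = (recProd rs).foldl (fun st t => stepA chosen st (i :: t)) st := by
              apply PySem.List.foldl_congr_mem
              intro st' t _
              exact (this st' t).symm
      · rw [if_neg (fun hx => hi (hmem.1 hx))]
        have hset : (chosen ++ (-1 : Int) :: List.replicate rs.length (-1)).set pre.length i
            = (chosen ++ [i]) ++ List.replicate rs.length (-1) := by
          rw [← hlen]
          simp
        rw [hset]
        have happ : pre ++ c :: rs = (pre ++ [c]) ++ rs := by simp
        have hl1 : pre.length + 1 = (pre ++ [c]).length := by simp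
        have hl2 : pre.length + (c :: rs).length = (pre ++ [c]).length + rs.length := by
          simp; omega
        rw [happ, hl1, hl2]
        rw [ih (pre ++ [c]) (chosen ++ [i]) st (by simp [hlen])
          (nodup_append_single hnd hi)
          (fun l hl => hnn l (by simp [hl]))]
        apply PySem.List.foldl_congr_mem
        intro st' t _
        unfold stepA
        rw [List.append_assoc, List.singleton_append]

lemma alt_eq (user banned : List String) :
    solution_alt user banned
      = (((recProd (banned.map (solutionTemp user))).foldl (stepA []) []).length : Int) := by
  simp only [solution_alt]
  have hcand : banned.map (fun ban =>
      ((PySem.List.enumerate user 0).filter (fun p =>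
          PySem.Str.len p.2 == PySem.Str.len ban &&
          (ban.toList.zip p.2.toList).all (fun q => q.1 == '*' || q.1 == q.2))).map (fun p => p.1))
      = banned.map (solutionTemp user) :=
    List.map_congr_left (fun ban _ => candB_eq user ban)
  rw [hcand, combos_foldl]
  have hflat : ([[]] : List (List Int)).flatMap
      (fun p => (recProd (banned.map (solutionTemp user))).map (fun t => p ++ t))
      = recProd (banned.map (solutionTemp user)) := by simp
  rw [hflat]
  have hfold : (recProd (banned.map (solutionTemp user))).foldl
      (fun s combo =>
        if PySem.Set.len (PySem.Set.ofList combo) == (banned.length : Int)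
        then PySem.Set.add s (PySem.List.sorted combo (fun x => x) false) else s)
      PySem.Set.empty
      = (recProd (banned.map (solutionTemp user))).foldl (stepA []) [] := by
    apply PySem.List.foldl_congr_mem
    intro s combo hc
    have hlc : combo.length = banned.length := by
      rw [length_mem_recProd _ combo hc]; simp
    have hcnd : (PySem.Set.len (PySem.Set.ofList combo) == (banned.length : Int)) = true
        ↔ combo.Nodup := by
      rw [← ofList_len_iff combo, ← hlc]
      simp [PySem.Set.len]
    unfold stepA addA
    simp only [List.nil_append]
    by_cases hnd : combo.Nodup
    · rw [if_pos (hcnd.2 hnd), if_pos hnd, set_add_eq]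
    · rw [if_neg (fun hx => hnd (hcnd.1 hx)), if_neg hnd]
  rw [hfold]
  simp [PySem.Set.len]

-- ===== VERDICT (by name: the statement is the Claim_ definition above) =====
theorem solution_spec : Claim_equal_solution := by
  intro user banned _
  unfold Spec_solution
  rw [alt_eq]
  unfold solution
  cases h : buildPsb user banned with
  | none =>
      obtain ⟨b, hb, ht⟩ := buildPsb_none user banned h
      have : ([] : List Int) ∈ banned.map (solutionTemp user) :=
        List.mem_map.2 ⟨b, hb, ht⟩
      rw [recProd_nil_mem _ this]
      simp
  | some psb =>
      have hpsb := buildPsb_some user banned psb h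
      have hlen : psb.length = banned.length := by rw [hpsb]; simp
      have hrep : (PySem.List.pyRange 0 (banned.length : Int) 1).map (fun _ => (-1 : Int))
          = List.replicate banned.length (-1) := by
        rw [PySem.List.pyRange_one]
        simp [Function.comp_def, List.map_const']
      simp only [hrep]
      have hnn : ∀ l ∈ psb, ∀ i ∈ l, 0 ≤ i := by
        intro l hl
        rw [hpsb] at hl
        obtain ⟨b, _, rfl⟩ := List.mem_map.1 hl
        exact solutionTemp_nonneg user b
      have := psbPair_eq psb [] [] [] rfl List.nodup_nil hnn
      simp only [List.nil_append, List.length_nil, Nat.zero_add] at this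
      rw [← hlen, this, hpsb]
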